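-- pv_equiv track=rewrite | github.com/PhilipWinchester/Scripts-for-blog | Python/I Will Tell You How to Become Rich.py | Max_Downs
-- ===== SOURCE A (Python) =====
-- def Max_Downs(Index_List):
--     """Function which takes a list of numbers and return the the maximum numbers of sucessive downs working from right to left"""
--     Ans = 0
--     Compar = 0
--
--     # Working our way up the Index_List
--     for i in range(-2,-len(Index_List)-1,-1):
--         if Index_List[i] < Index_List[i+1]:
--             Compar += 1
--         else:
--             Ans = max(Compar, Ans)
--             Compar = 0
--
--     Ans = max(Compar, Ans)
--     return(Ans)
-- ===== SOURCE B (Python) =====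
-- def _runs(downs):
--     """Split downs at each False: lengths of the maximal runs of True, in order."""
--     runs = []
--     start = 0
--     while True:
--         try:
--             k = downs.index(False, start)
--         except ValueError:
--             runs.append(len(downs) - start)
--             return runs
--         runs.append(k - start)
--         start = k + 1
--
--
-- def Max_Downs(Index_List):
--     """Function which takes a list of numbers and return the the maximum numbers of sucessive downs working from right to left"""
--     downs = [a < b for a, b in zip(Index_List, Index_List[1:])]
--     return max(_runs(downs))
-- ===== Notes on version B (the rewrite author's own statement) =====
-- stated objective: alternative
-- what changed: B builds the boolean table of pairwise decreases once and recursively splits it at each False (via list.index) into run lengths, returning their max, instead of A's right-to-left online accumulator over negative indices.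
import Mathlib
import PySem

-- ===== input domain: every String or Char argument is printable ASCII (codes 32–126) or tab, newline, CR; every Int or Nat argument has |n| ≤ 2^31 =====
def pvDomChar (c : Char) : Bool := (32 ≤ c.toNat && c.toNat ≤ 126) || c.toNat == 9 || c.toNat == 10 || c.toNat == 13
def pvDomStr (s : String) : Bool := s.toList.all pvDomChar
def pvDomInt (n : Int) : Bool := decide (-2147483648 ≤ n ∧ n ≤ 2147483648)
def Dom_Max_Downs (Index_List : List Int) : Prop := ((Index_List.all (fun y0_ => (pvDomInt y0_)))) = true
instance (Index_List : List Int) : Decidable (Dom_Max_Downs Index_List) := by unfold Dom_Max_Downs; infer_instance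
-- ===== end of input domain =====

-- B replaces A's right-to-left online accumulator with a build-the-down-table-then-split-into-runs decomposition (alternative, same cost).

-- ===== PORT A =====
-- A: for i in range(-2, -len-1, -1): compare Index_List[i] < Index_List[i+1] with state (Ans, Compar);
-- the negative indices are always in range, so pyGetD's default is never read.
def Max_Downs (Index_List : List Int) : Int :=
  let n : Int := (Index_List.length : Int)
  let s :=
    (PySem.List.pyRange (-2) (-n - 1) (-1)).foldl
      (fun (st : Int × Int) i =>
        if PySem.List.pyGetD Index_List i 0 < PySem.List.pyGetD Index_List (i + 1) 0 then
          (st.1, st.2 + 1)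
        else
          (max st.2 st.1, 0))
      (0, 0)
  max s.2 s.1

-- ===== PORT B =====
-- _runs: while-loop with downs.index(False, start) ported as structural recursion on the measure
-- len(downs) - start; downs.index(False, start) = start + first index of False in downs[start:]
-- (exact: ValueError ↔ none), the try/except is the match.
def pvRunsFrom (downs : List Bool) (runs : List Int) (start : Nat) : List Int :=
  match h : PySem.List.index? (downs.drop start) false with
  | none => runs ++ [((downs.length - start : Nat) : Int)]
  | some j =>
    let k := start + j
    pvRunsFrom downs (runs ++ [((k - start : Nat) : Int)]) (k + 1)
termination_by downs.length - start
decreasing_by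
  obtain ⟨hk, -, -⟩ := PySem.List.getElem_of_index?_eq_some h
  simp [List.length_drop] at hk
  omega

def Max_Downs_alt (Index_List : List Int) : Int :=
  let downs :=
    (Index_List.zip (PySem.List.slice Index_List (some 1) none)).map
      (fun p => decide (p.1 < p.2))
  -- max(_runs(downs)): _runs never returns [], so getD's default is never read
  (PySem.List.max? (pvRunsFrom downs [] 0) (fun y => y)).getD 0

-- ===== PRECONDITION & SPEC =====
def Spec_Max_Downs (Index_List : List Int) (out : Int) : Prop := out = Max_Downs_alt Index_List
instance (Index_List : List Int) (out : Int) : Decidable (Spec_Max_Downs Index_List out) := by unfold Spec_Max_Downs; infer_instance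

-- ===== CLAIM (what is proved, stated in full; the proofs are below) =====
def Claim_equal_Max_Downs : Prop := ∀ (Index_List : List Int), Dom_Max_Downs Index_List → Spec_Max_Downs Index_List (Max_Downs Index_List)

-- ===== LEMMAS AND PROOFS =====

-- reference function: lengths of the maximal True-runs, leftmost run first
def runLengths : List Bool → List Int
  | [] => [0]
  | true :: t =>
    match runLengths t with
    | h :: r => (h + 1) :: r
    | [] => [1]
  | false :: t => 0 :: runLengths t

-- the boolean table both programs reduce to
def downsList (xs : List Int) : List Bool :=
  (xs.zip xs.tail).map (fun p => decide (p.1 < p.2))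

lemma runLengths_ne_nil (l : List Bool) : runLengths l ≠ [] := by
  cases l with
  | nil => simp [runLengths]
  | cons b t =>
    cases b <;> simp [runLengths]
    cases h : runLengths t <;> simp

lemma runLengths_head_nonneg : ∀ (l : List Bool) (h r), runLengths l = h :: r → 0 ≤ h := by
  intro l
  induction l with
  | nil => intro h r hl; simp [runLengths] at hl; omega
  | cons b t ih =>
    intro h r hl
    cases b with
    | false => simp [runLengths] at hl; omega
    | true =>
      cases ht : runLengths t with
      | nil => exact absurd ht (runLengths_ne_nil t)
      | cons h' r' =>
        simp [runLengths, ht] at hl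
        have := ih h' r' ht
        omega

lemma runLengths_all_true : ∀ (l : List Bool), false ∉ l → runLengths l = [(l.length : Int)] := by
  intro l
  induction l with
  | nil => intro _; simp [runLengths]
  | cons b t ih =>
    intro hf
    simp at hf
    obtain ⟨hb, hft⟩ := hf
    cases b with
    | false => simp at hb
    | true =>
      rw [runLengths, ih (by simpa using hft)]
      push_cast
      simp

lemma foldl_max_init (l : List Int) : ∀ (a b : Int),
    l.foldl max (max a b) = max a (l.foldl max b) := by
  induction l with
  | nil => intro a b; simp
  | cons c t ih =>
    intro a b
    simp only [List.foldl_cons]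
    rw [max_assoc, ih]

lemma slice_from_nat (l : List Bool) (k : Nat) :
    PySem.List.slice l (some ((k : Int) + 1)) none = l.drop (k + 1) := by
  have := PySem.List.slice_from_natCast l (k + 1)
  push_cast at this
  exact this

-- proof-side reference: the recursive form of the split loop
def pvRuns (downs : List Bool) : List Int :=
  match h : PySem.List.index? downs false with
  | some k => (k : Int) :: pvRuns (PySem.List.slice downs (some ((k : Int) + 1)) none)
  | none => [(downs.length : Int)]
termination_by downs.length
decreasing_by
  obtain ⟨hk, -, -⟩ := PySem.List.getElem_of_index?_eq_some h
  have hs := slice_from_nat downs k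
  simp [hs]
  omega


lemma pvRuns_some {l : List Bool} {k : Nat} (h : PySem.List.index? l false = some k) :
    pvRuns l = (k : Int) :: pvRuns (PySem.List.slice l (some ((k : Int) + 1)) none) := by
  rw [pvRuns, h]

lemma pvRuns_none {l : List Bool} (h : PySem.List.index? l false = none) :
    pvRuns l = [(l.length : Int)] := by
  rw [pvRuns, h]

lemma pvRuns_eq_runLengths : ∀ l : List Bool, pvRuns l = runLengths l := by
  intro l
  induction l with
  | nil =>
    rw [pvRuns_none (by simp [PySem.List.index?_eq_idxOf?])]
    simp [runLengths]
  | cons b t ih =>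
    cases b with
    | false =>
      rw [pvRuns_some (PySem.List.index?_cons_self false t)]
      rw [slice_from_nat]
      simp [runLengths, ih]
    | true =>
      cases ht : PySem.List.index? t false with
      | none =>
        have h1 : PySem.List.index? (true :: t) false = none := by
          rw [PySem.List.index?_cons_of_ne t (by simp), ht]; rfl
        rw [pvRuns_none h1,
          show runLengths (true :: t) = match runLengths t with
            | h :: r => (h + 1) :: r | [] => [1] from rfl,
          runLengths_all_true t (by rw [← PySem.List.index?_eq_none_iff]; exact ht)]
        push_cast
        simp
      | some k =>
        have h1 : PySem.List.index? (true :: t) false = some (k + 1) := by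
          rw [PySem.List.index?_cons_of_ne t (by simp), ht]; rfl
        rw [pvRuns_some h1, slice_from_nat,
          show runLengths (true :: t) = match runLengths t with
            | h :: r => (h + 1) :: r | [] => [1] from rfl,
          ← ih, pvRuns_some ht, slice_from_nat]
        push_cast
        simp [List.drop]

lemma foldr_stepA : ∀ (l : List Bool) (h r), runLengths l = h :: r →
    l.foldr
      (fun d (st : Int × Int) => if d then (st.1, st.2 + 1) else (max st.2 st.1, 0))
      (0, 0) = (r.foldl max 0, h) := by
  intro l
  induction l with
  | nil =>
    intro h r hl
    simp [runLengths] at hl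
    obtain ⟨h1, h2⟩ := hl
    subst h1; subst h2
    simp
  | cons b t ih =>
    intro h r hl
    cases ht : runLengths t with
    | nil => exact absurd ht (runLengths_ne_nil t)
    | cons h' r' =>
      have hfold := ih h' r' ht
      cases b with
      | true =>
        rw [show runLengths (true :: t) = match runLengths t with
            | a :: s => (a + 1) :: s | [] => [1] from rfl, ht] at hl
        simp at hl
        simp [List.foldr_cons, hfold, hl.1.symm, hl.2.symm]
      | false =>
        rw [show runLengths (false :: t) = 0 :: runLengths t from rfl, ht] at hl
        simp at hl
        obtain ⟨h1, h2⟩ := hl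
        subst h1; subst h2
        simp [List.foldr_cons, hfold]
        rw [show max (0:Int) h' = max h' 0 from max_comm 0 h', foldl_max_init]

lemma range_map_eq_downsList (xs : List Int) :
    (PySem.List.pyRange (-(xs.length : Int)) (-1) 1).map
      (fun i => decide (PySem.List.pyGetD xs i 0 < PySem.List.pyGetD xs (i + 1) 0))
      = downsList xs := by
  rw [PySem.List.pyRange_one, List.map_map]
  apply List.ext_getElem
  · simp [downsList, List.length_zip]
    omega
  · intro i hi1 hi2
    simp only [List.getElem_map, List.getElem_range, Function.comp_apply, downsList,
      List.getElem_zip, List.getElem_tail]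
    have hlen : i < xs.length - 1 := by
      simp at hi1
      omega
    have e1 : -(xs.length : Int) + (i : Int) = -((xs.length - i : Nat) : Int) := by
      push_cast [Nat.cast_sub (by omega : i ≤ xs.length)]
      ring
    have e2 : -((xs.length - i : Nat) : Int) + 1 = -((xs.length - i - 1 : Nat) : Int) := by
      push_cast [Nat.cast_sub (by omega : i ≤ xs.length), Nat.cast_sub (by omega : 1 ≤ xs.length - i)]
      ring
    rw [e1, e2, PySem.List.pyGetD_neg_natCast xs (xs.length - i) 0 (by omega) (by omega),
      PySem.List.pyGetD_neg_natCast xs (xs.length - i - 1) 0 (by omega) (by omega)]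
    simp only [show xs.length - (xs.length - i) = i by omega,
      show xs.length - (xs.length - i - 1) = i + 1 by omega]

lemma pvRunsFrom_none {downs : List Bool} {runs : List Int} {start : Nat}
    (h : PySem.List.index? (downs.drop start) false = none) :
    pvRunsFrom downs runs start = runs ++ [((downs.length - start : Nat) : Int)] := by
  rw [pvRunsFrom, h]

lemma pvRunsFrom_some {downs : List Bool} {runs : List Int} {start j : Nat}
    (h : PySem.List.index? (downs.drop start) false = some j) :
    pvRunsFrom downs runs start
      = pvRunsFrom downs (runs ++ [((start + j - start : Nat) : Int)]) (start + j + 1) := by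
  rw [pvRunsFrom, h]

lemma pvRunsFrom_eq (downs : List Bool) : ∀ (n : Nat) (runs : List Int) (start : Nat),
    downs.length - start ≤ n →
    pvRunsFrom downs runs start = runs ++ pvRuns (downs.drop start) := by
  intro n
  induction n with
  | zero =>
    intro runs start hn
    have hd : downs.drop start = [] := by
      apply List.eq_nil_of_length_eq_zero
      simp [List.length_drop]
      omega
    rw [pvRunsFrom_none (by rw [hd]; simp [PySem.List.index?_eq_idxOf?]),
      hd, pvRuns_none (by simp [PySem.List.index?_eq_idxOf?])]
    simp
    omega
  | succ m ih =>
    intro runs start hn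
    cases h : PySem.List.index? (downs.drop start) false with
    | none =>
      rw [pvRunsFrom_none h, pvRuns_none h]
      simp
    | some j =>
      obtain ⟨hj, -, -⟩ := PySem.List.getElem_of_index?_eq_some h
      simp [List.length_drop] at hj
      rw [pvRunsFrom_some h, ih _ _ (by omega), pvRuns_some h, slice_from_nat,
        List.drop_drop]
      simp [show start + j - start = j by omega, show start + (j + 1) = start + j + 1 by omega]

-- ===== VERDICT (by name: the statement is the Claim_ definition above) =====
theorem Max_Downs_spec : Claim_equal_Max_Downs := by
  intro xs _
  show Max_Downs xs = Max_Downs_alt xs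
  obtain ⟨h, r, hl⟩ : ∃ h r, runLengths (downsList xs) = h :: r := by
    cases hrl : runLengths (downsList xs) with
    | nil => exact absurd hrl (runLengths_ne_nil _)
    | cons a b => exact ⟨a, b, rfl⟩
  have hh := runLengths_head_nonneg _ h r hl
  have hB : Max_Downs_alt xs = r.foldl max h := by
    unfold Max_Downs_alt
    rw [PySem.List.slice_from_one]
    show (PySem.List.max? (pvRunsFrom (downsList xs) [] 0) _).getD 0 = _
    rw [pvRunsFrom_eq (downsList xs) (downsList xs).length [] 0 (by omega)]
    simp only [List.drop_zero, List.nil_append]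
    rw [pvRuns_eq_runLengths, hl, PySem.List.max?_id_cons]
    rfl
  have hF := foldr_stepA (downsList xs) h r hl
  rw [← range_map_eq_downsList xs, List.foldr_map] at hF
  simp only [decide_eq_true_eq] at hF
  have hA : Max_Downs xs = max h (r.foldl max 0) := by
    simp only [Max_Downs]
    rw [PySem.List.pyRange_neg_one_eq_reverse,
      show (-(xs.length : Int) - 1 + 1) = -(xs.length : Int) by ring,
      show (-2 : Int) + 1 = -1 by ring, List.foldl_reverse, hF]
  have hM := foldl_max_init r h 0
  rw [max_eq_left hh] at hM
  rw [hA, hB, hM]
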